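-- pv_equiv track=rewrite | github.com/taevonlewis/Data-Structures-and-Algorithm-Solutions | 2327-largest-number-after-digit-swaps-by-parity/2327-largest-number-after-digit-swaps-by-parity.py | largestInteger
-- ===== SOURCE A (Python) =====
-- def largestInteger(num: int):
--     n = len(str(num))
--     arr = [int(i) for i in str(num)]
--     odd, even = [], []
--     for i in arr:
--         if i % 2 == 0:
--             even.append(i)
--         else:
--             odd.append(i)
--     odd.sort()
--     even.sort()
--     res = 0
--     for i in range(n):
--         if arr[i] % 2 == 0:
--             res = res*10 + even.pop()
--         else:
--             res = res*10 + odd.pop()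
--     return res
-- ===== SOURCE B (Python) =====
-- def largestInteger(num: int):
--     s = str(num)
--     counts = {}
--     for c in s:
--         d = int(c)
--         counts[d] = counts.get(d, 0) + 1
--     res = 0
--     for c in s:
--         d = int(c)
--         start = 9 if d % 2 != 0 else 8
--         for top in range(start, -1, -2):
--             if counts.get(top, 0) != 0:
--                 break
--         counts[top] = counts.get(top, 0) - 1
--         res = res * 10 + top
--     return res
-- ===== Notes on version B (the rewrite author's own statement) =====
-- stated objective: alternative
-- what changed: Replaces the two sorted parity lists consumed by pop() with a digit-frequency table built in one pass and consumed by scanning the ten buckets top-down per position (counting sort of a bounded alphabet instead of comparison sort).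
import Mathlib
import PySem

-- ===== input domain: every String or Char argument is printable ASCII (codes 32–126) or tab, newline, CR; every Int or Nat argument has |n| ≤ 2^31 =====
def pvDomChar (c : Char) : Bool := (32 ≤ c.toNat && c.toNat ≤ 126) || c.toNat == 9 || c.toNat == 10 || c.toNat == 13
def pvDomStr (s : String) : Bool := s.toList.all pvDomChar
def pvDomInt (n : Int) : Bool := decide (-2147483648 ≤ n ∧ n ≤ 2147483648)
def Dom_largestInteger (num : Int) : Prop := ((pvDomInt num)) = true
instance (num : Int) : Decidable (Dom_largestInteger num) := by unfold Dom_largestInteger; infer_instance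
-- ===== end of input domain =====

-- B replaces A's two sorted parity lists consumed by pop() with a digit-frequency table
-- consumed by a top-down bucket scan per position (alternative decomposition).

-- int(c) for a single character c (ValueError → none; the port defaults the Option to 0,
-- which is reached only on inputs Pre_ excludes)
def pvCharToInt (c : Char) : Int := (PySem.Int.ofChars? [c]).getD 0

-- ===== PORT A =====
-- body of A's consuming loop: pop the largest remaining digit of arr[i]'s parity
-- (Python's even.pop()/odd.pop() raises IndexError on an empty list; that branch is
-- unreachable for num ≥ 0, the port returns the state unchanged there)
def pvStepA (st : Int × List Int × List Int) (d : Int) : Int × List Int × List Int :=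
  if PySem.Int.mod d 2 = 0 then
    match PySem.List.pop? st.2.2 with
    | some (v, rest) => (st.1 * 10 + v, st.2.1, rest)
    | none => st
  else
    match PySem.List.pop? st.2.1 with
    | some (v, rest) => (st.1 * 10 + v, rest, st.2.2)
    | none => st

def largestInteger (num : Int) : Int :=
  let n : Int := ((PySem.Int.toChars num).length : Int)
  let arr : List Int := (PySem.Int.toChars num).map pvCharToInt
  let oddEven := arr.foldl
    (fun (p : List Int × List Int) i =>
      if PySem.Int.mod i 2 = 0 then (p.1, p.2 ++ [i]) else (p.1 ++ [i], p.2)) ([], [])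
  let odd := PySem.List.sorted oddEven.1 (fun x => x) false
  let even := PySem.List.sorted oddEven.2 (fun x => x) false
  ((PySem.List.pyRange 0 n 1).foldl
    (fun st i => pvStepA st (PySem.List.pyGetD arr i 0)) ((0 : Int), odd, even)).1

-- ===== PORT B =====
-- body of B's consuming loop: scan the buckets of d's parity from the top and take the
-- first nonempty one (the for/break loop; (start-8) is the loop variable's fall-through value)
def pvStepB (st : Int × PySem.Dict Int Int) (d : Int) : Int × PySem.Dict Int Int :=
  let start : Int := if PySem.Int.mod d 2 ≠ 0 then 9 else 8
  let top : Int :=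
    ((PySem.List.pyRange start (-1) (-2)).find? (fun t => st.2.getD t 0 != 0)).getD (start - 8)
  (st.1 * 10 + top, st.2.insert top (st.2.getD top 0 - 1))

def largestInteger_alt (num : Int) : Int :=
  let s := PySem.Int.toChars num
  let counts := s.foldl
    (fun d c => d.insert (pvCharToInt c) (d.getD (pvCharToInt c) 0 + 1)) PySem.Dict.empty
  (s.foldl (fun st c => pvStepB st (pvCharToInt c)) ((0 : Int), counts)).1

-- ===== PRECONDITION & SPEC =====
-- Pre_ excludes negative num: there str(num) starts with a minus sign and A raises ValueError at int of that sign character.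
def Pre_largestInteger (num : Int) : Prop := 0 ≤ num
instance (num : Int) : Decidable (Pre_largestInteger num) := by unfold Pre_largestInteger; infer_instance
def pvWitness_largestInteger : Int := (2736)

def Spec_largestInteger (num : Int) (out : Int) : Prop := out = largestInteger_alt num
instance (num : Int) (out : Int) : Decidable (Spec_largestInteger num out) := by unfold Spec_largestInteger; infer_instance

-- ===== CLAIM (what is proved, stated in full; the proofs are below) =====
def Claim_equal_largestInteger : Prop := ∀ (num : Int), Dom_largestInteger num → Pre_largestInteger num → Spec_largestInteger num (largestInteger num)

-- ===== LEMMAS AND PROOFS =====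

-- every character of str(num) for num ≥ 0 is one of the ten digit characters
def pvDigs : List Char := ['0','1','2','3','4','5','6','7','8','9']

lemma pv_digitChar_mem (k : Nat) (hk : k < 10) : Nat.digitChar k ∈ pvDigs := by
  interval_cases k <;> decide

lemma pv_toDigitsCore_mem (fuel : Nat) : ∀ (n : Nat) (acc : List Char),
    (∀ c ∈ acc, c ∈ pvDigs) → ∀ c ∈ Nat.toDigitsCore 10 fuel n acc, c ∈ pvDigs := by
  induction fuel with
  | zero => intro n acc hacc c hc; exact hacc c hc
  | succ f ih =>
    intro n acc hacc c hc
    rw [Nat.toDigitsCore] at hc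
    by_cases h : n / 10 = 0
    · simp only [h] at hc
      rcases List.mem_cons.mp hc with h1 | h1
      · subst h1; exact pv_digitChar_mem _ (Nat.mod_lt _ (by omega))
      · exact hacc c h1
    · simp only [h, if_neg h] at hc
      exact ih (n / 10) _ (by
        intro c' hc'
        rcases List.mem_cons.mp hc' with h1 | h1
        · subst h1; exact pv_digitChar_mem _ (Nat.mod_lt _ (by omega))
        · exact hacc c' h1) c hc

lemma pv_toChars_mem (num : Int) (h : 0 ≤ num) :
    ∀ c ∈ PySem.Int.toChars num, c ∈ pvDigs := by
  intro c hc
  unfold PySem.Int.toChars at hc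
  rw [if_neg (by omega)] at hc
  exact pv_toDigitsCore_mem _ _ _ (by intro c' hc'; simp at hc') c hc

set_option maxRecDepth 100000 in
lemma pv_charToInt_bounds : ∀ c ∈ pvDigs, 0 ≤ pvCharToInt c ∧ pvCharToInt c ≤ 9 := by
  intro c hc
  fin_cases hc <;> exact ⟨by decide, by decide⟩

lemma pv_le_getLast (l : List Int) (h : l ≠ []) (hp : l.Pairwise (· ≤ ·)) :
    ∀ x ∈ l, x ≤ l.getLast h := by
  intro x hx
  have hdec := List.dropLast_concat_getLast h
  rw [← hdec] at hp hx
  rcases List.mem_append.mp hx with h1 | h1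
  · exact (List.pairwise_append.mp hp).2.2 x h1 _ (by simp)
  · simp at h1; omega

-- the top-down even scan finds the maximum nonempty even bucket
lemma pv_find_even (cnt : Int → Int) (M : Int) (h0 : 0 ≤ M) (h9 : M ≤ 9) (hpar : M % 2 = 0)
    (hM : cnt M ≠ 0) (habove : ∀ t, M < t → t % 2 = 0 → cnt t = 0) :
    (PySem.List.pyRange 8 (-1) (-2)).find? (fun t => cnt t != 0) = some M := by
  have hr : PySem.List.pyRange 8 (-1) (-2) = [8, 6, 4, 2, 0] := by decide
  rw [hr]; interval_cases M <;> simp_all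

-- the top-down odd scan finds the maximum nonempty odd bucket
lemma pv_find_odd (cnt : Int → Int) (M : Int) (h0 : 0 ≤ M) (h9 : M ≤ 9) (hpar : M % 2 = 1)
    (hM : cnt M ≠ 0) (habove : ∀ t, M < t → t % 2 = 1 → cnt t = 0) :
    (PySem.List.pyRange 9 (-1) (-2)).find? (fun t => cnt t != 0) = some M := by
  have hr : PySem.List.pyRange 9 (-1) (-2) = [9, 7, 5, 3, 1] := by decide
  rw [hr]; interval_cases M <;> simp_all

-- A's partition loop, in closed form
lemma pv_part (l : List Int) (o e : List Int) :
    l.foldl (fun (p : List Int × List Int) i =>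
      if PySem.Int.mod i 2 = 0 then (p.1, p.2 ++ [i]) else (p.1 ++ [i], p.2)) (o, e)
    = (o ++ l.filter (fun i => !(decide (PySem.Int.mod i 2 = 0))),
       e ++ l.filter (fun i => decide (PySem.Int.mod i 2 = 0))) := by
  induction l generalizing o e with
  | nil => simp
  | cons x xs ih =>
    rw [List.foldl_cons, List.filter_cons, List.filter_cons]
    by_cases hx : PySem.Int.mod x 2 = 0
    · rw [if_pos hx, ih]
      simp [hx]
      exact (PySem.Int.mod_eq_zero_iff_dvd x 2).mp hx
    · rw [if_neg hx, ih]
      simp [hx]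
      rw [PySem.Int.mod_eq_zero_iff_dvd] at hx
      omega

-- the main invariant: A's state (res, od, ev) and B's state (res, cnt) stay in step
lemma pv_main (l : List Int) : ∀ (res : Int) (od ev : List Int) (cnt : PySem.Dict Int Int),
    (∀ x ∈ l, 0 ≤ x ∧ x ≤ 9) →
    od.Pairwise (· ≤ ·) → ev.Pairwise (· ≤ ·) →
    (∀ x ∈ od, x % 2 = 1 ∧ 0 ≤ x ∧ x ≤ 9) →
    (∀ x ∈ ev, x % 2 = 0 ∧ 0 ≤ x ∧ x ≤ 9) →
    (∀ x, cnt.getD x 0 = (od.count x : Int) + (ev.count x : Int)) →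
    od.length = l.countP (fun x => !(decide (PySem.Int.mod x 2 = 0))) →
    ev.length = l.countP (fun x => decide (PySem.Int.mod x 2 = 0)) →
    (l.foldl pvStepA (res, od, ev)).1 = (l.foldl pvStepB (res, cnt)).1 := by
  induction l with
  | nil => intro res od ev cnt _ _ _ _ _ _ _ _; rfl
  | cons d l' ih =>
    intro res od ev cnt hl hodS hevS hodP hevP hcnt hodL hevL
    obtain ⟨hd0, hd9⟩ := hl d (by simp)
    have hmodd : PySem.Int.mod d 2 = d % 2 := PySem.Int.mod_eq_emod_of_pos (by omega)
    rw [List.foldl_cons, List.foldl_cons]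
    by_cases hpar : d % 2 = 0
    · -- even position
      have hevne : ev ≠ [] := by
        have : ev.length > 0 := by
          rw [hevL, List.countP_cons]
          simp [hmodd, hpar]
        exact List.ne_nil_of_length_pos this
      set M := ev.getLast hevne with hMdef
      have hdec : ev.dropLast ++ [M] = ev := List.dropLast_concat_getLast hevne
      have hMmem : M ∈ ev := List.getLast_mem hevne
      obtain ⟨hMpar, hM0, hM9⟩ := hevP M hMmem
      have hmax : ∀ x ∈ ev, x ≤ M := pv_le_getLast ev hevne hevS
      have hpop : PySem.List.pop? ev = some (M, ev.dropLast) := by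
        conv_lhs => rw [← hdec]
        exact PySem.List.pop?_last _ _
      have hfind : (PySem.List.pyRange 8 (-1) (-2)).find? (fun t => cnt.getD t 0 != 0)
          = some M := by
        apply pv_find_even _ M hM0 hM9 hMpar
        · rw [hcnt M]
          have : 0 < ev.count M := List.count_pos_iff.mpr hMmem
          omega
        · intro t hMt htpar
          rw [hcnt t]
          have hod : od.count t = 0 := by
            rw [List.count_eq_zero]
            intro hmem; obtain ⟨h1, _, _⟩ := hodP t hmem; omega
          have hev : ev.count t = 0 := by
            rw [List.count_eq_zero]
            intro hmem; exact absurd (hmax t hmem) (by omega)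
          rw [hod, hev]; simp
      have hstepA : pvStepA (res, od, ev) d = (res * 10 + M, od, ev.dropLast) := by
        simp [pvStepA, hmodd, hpar, hpop]
      have hstepB : pvStepB (res, cnt) d = (res * 10 + M, cnt.insert M (cnt.getD M 0 - 1)) := by
        simp only [pvStepB, hmodd, hpar]
        simp [hfind]
      rw [hstepA, hstepB]
      have hcount : ∀ x, (ev.count x : Int) = (ev.dropLast.count x : Int) + (if M = x then 1 else 0) := by
        intro x
        conv_lhs => rw [← hdec]
        rw [List.count_append, List.count_singleton]
        by_cases hMx : M = x <;> simp [hMx]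
      apply ih
      · intro x hx; exact hl x (by simp [hx])
      · exact hodS
      · exact hevS.sublist (List.dropLast_sublist ev)
      · exact hodP
      · intro x hx; exact hevP x ((List.dropLast_sublist ev).subset hx)
      · intro x
        rw [PySem.Dict.getD_insert]
        by_cases hMx : x = M
        · rw [if_pos hMx, hMx, hcnt M, hcount M, if_pos rfl]
          ring
        · rw [if_neg hMx, hcnt x, hcount x, if_neg (fun h => hMx h.symm)]
          ring
      · rw [hodL, List.countP_cons]; simp [hmodd, hpar]
      · have : ev.dropLast.length = ev.length - 1 := by
          rw [List.length_dropLast]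
        rw [this, hevL, List.countP_cons]
        simp [hmodd, hpar]
    · -- odd position
      have hpar1 : d % 2 = 1 := by omega
      have hodne : od ≠ [] := by
        have : od.length > 0 := by
          rw [hodL, List.countP_cons]
          simp [hmodd, hpar]
        exact List.ne_nil_of_length_pos this
      set M := od.getLast hodne with hMdef
      have hdec : od.dropLast ++ [M] = od := List.dropLast_concat_getLast hodne
      have hMmem : M ∈ od := List.getLast_mem hodne
      obtain ⟨hMpar, hM0, hM9⟩ := hodP M hMmem
      have hmax : ∀ x ∈ od, x ≤ M := pv_le_getLast od hodne hodS
      have hpop : PySem.List.pop? od = some (M, od.dropLast) := by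
        conv_lhs => rw [← hdec]
        exact PySem.List.pop?_last _ _
      have hfind : (PySem.List.pyRange 9 (-1) (-2)).find? (fun t => cnt.getD t 0 != 0)
          = some M := by
        apply pv_find_odd _ M hM0 hM9 hMpar
        · rw [hcnt M]
          have : 0 < od.count M := List.count_pos_iff.mpr hMmem
          omega
        · intro t hMt htpar
          rw [hcnt t]
          have hev : ev.count t = 0 := by
            rw [List.count_eq_zero]
            intro hmem; obtain ⟨h1, _, _⟩ := hevP t hmem; omega
          have hod : od.count t = 0 := by
            rw [List.count_eq_zero]
            intro hmem; exact absurd (hmax t hmem) (by omega)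
          rw [hod, hev]; simp
      have hstepA : pvStepA (res, od, ev) d = (res * 10 + M, od.dropLast, ev) := by
        simp only [pvStepA, hmodd, hpar1]
        norm_num
        rw [hpop]
      have hstepB : pvStepB (res, cnt) d = (res * 10 + M, cnt.insert M (cnt.getD M 0 - 1)) := by
        simp only [pvStepB, hmodd, hpar1]
        simp [hfind]
      rw [hstepA, hstepB]
      have hcount : ∀ x, (od.count x : Int) = (od.dropLast.count x : Int) + (if M = x then 1 else 0) := by
        intro x
        conv_lhs => rw [← hdec]
        rw [List.count_append, List.count_singleton]
        by_cases hMx : M = x <;> simp [hMx]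
      apply ih
      · intro x hx; exact hl x (by simp [hx])
      · exact hodS.sublist (List.dropLast_sublist od)
      · exact hevS
      · intro x hx; exact hodP x ((List.dropLast_sublist od).subset hx)
      · exact hevP
      · intro x
        rw [PySem.Dict.getD_insert]
        by_cases hMx : x = M
        · rw [if_pos hMx, hMx, hcnt M, hcount M, if_pos rfl]
          ring
        · rw [if_neg hMx, hcnt x, hcount x, if_neg (fun h => hMx h.symm)]
          ring
      · have : od.dropLast.length = od.length - 1 := by
          rw [List.length_dropLast]
        rw [this, hodL, List.countP_cons]
        simp [hmodd, hpar]
      · rw [hevL, List.countP_cons]; simp [hmodd, hpar]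

theorem largestInteger_spec_aux (num : Int) (h : 0 ≤ num) :
    largestInteger num = largestInteger_alt num := by
  unfold largestInteger largestInteger_alt
  simp only
  set s := PySem.Int.toChars num with hs
  set arr : List Int := s.map pvCharToInt with harr
  have hbound : ∀ x ∈ arr, 0 ≤ x ∧ x ≤ 9 := by
    intro x hx
    rw [harr] at hx
    obtain ⟨c, hc, rfl⟩ := List.mem_map.mp hx
    exact pv_charToInt_bounds c (pv_toChars_mem num h c hc)
  have hlen : ((s.length : Nat) : Int) = ((arr.length : Nat) : Int) := by
    rw [harr, List.length_map]
  rw [hlen, PySem.List.foldl_pyRange_zero_pyGetD' arr 0 pvStepA]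
  rw [pv_part]
  have e2 : List.foldl (fun d c => PySem.Dict.insert d (pvCharToInt c) (d.getD (pvCharToInt c) 0 + 1)) PySem.Dict.empty s = PySem.Dict.counter arr := by
    rw [← PySem.Dict.foldl_insert_getD_add_one_eq_counter arr, harr, List.foldl_map]
  have e1 : ∀ (init : Int × PySem.Dict Int Int), List.foldl (fun st c => pvStepB st (pvCharToInt c)) init s = List.foldl pvStepB init arr := by
    intro init; rw [harr, List.foldl_map]
  rw [e2, e1]
  set po := arr.filter (fun i => !(decide (PySem.Int.mod i 2 = 0))) with hpo
  set pe := arr.filter (fun i => decide (PySem.Int.mod i 2 = 0)) with hpe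
  simp only [List.nil_append]
  apply pv_main arr 0
    (PySem.List.sorted po (fun x => x) false)
    (PySem.List.sorted pe (fun x => x) false)
    (PySem.Dict.counter arr) hbound
  · simpa using PySem.List.sorted_pairwise po (fun x => x)
  · simpa using PySem.List.sorted_pairwise pe (fun x => x)
  · intro x hx
    have hx' : x ∈ po := (PySem.List.mem_sorted _ _ _ x).mp hx
    obtain ⟨hmem, hpx⟩ := List.mem_filter.mp hx'
    obtain ⟨h0, h9⟩ := hbound x hmem
    simp at hpx
    exact ⟨by omega, h0, h9⟩
  · intro x hx
    have hx' : x ∈ pe := (PySem.List.mem_sorted _ _ _ x).mp hx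
    obtain ⟨hmem, hpx⟩ := List.mem_filter.mp hx'
    obtain ⟨h0, h9⟩ := hbound x hmem
    simp at hpx
    exact ⟨by omega, h0, h9⟩
  · intro x
    rw [PySem.Dict.getD_counter]
    rw [(PySem.List.sorted_perm po (fun x => x) false).count_eq,
        (PySem.List.sorted_perm pe (fun x => x) false).count_eq]
    by_cases hx : (2 : Int) ∣ x
    · have h1 : po.count x = 0 := by
        rw [List.count_eq_zero]
        intro hmem
        have := (List.mem_filter.mp hmem).2
        simp at this
        omega
      have h2 : pe.count x = arr.count x := by
        rw [hpe, List.count_filter (by simpa using hx)]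
      rw [h1, h2]; ring
    · have h1 : pe.count x = 0 := by
        rw [List.count_eq_zero]
        intro hmem
        have := (List.mem_filter.mp hmem).2
        simp at this
        omega
      have h2 : po.count x = arr.count x := by
        rw [hpo, List.count_filter (by simpa using hx)]
      rw [h1, h2]; ring
  · rw [PySem.List.length_sorted, hpo, ← List.countP_eq_length_filter]
  · rw [PySem.List.length_sorted, hpe, ← List.countP_eq_length_filter]

-- ===== VERDICT (by name: the statement is the Claim_ definition above) =====
theorem largestInteger_spec : Claim_equal_largestInteger := by
  intro num _ hpre
  unfold Spec_largestInteger
  exact largestInteger_spec_aux num hpre
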